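-- pv_equiv track=rewrite | github.com/klercke/advent-of-code | day3/d3p1.py | data2Rates
-- ===== SOURCE A (Python) =====
-- def data2Rates(data):
--     # Store these as strings so I can concat to them
--     gamma = ''
--     epsilon = ''
--
--     # Determine the length of the binary values (disregarding \n)
--     valueSize = len(data[0]) - 1
--
--     # Loop over each binary place and determine the most common value
--     for i in range(valueSize):
--         # Reset the ones counter for each place
--         ones = 0
--
--         # Loop over each datapoint and record the number of ones
--         for j in data:
--             if j[i] == '1':
--                 ones += 1
--
--         # Determine if there are more ones or zeroes in this place
--         if ones > (len(data) - ones):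
--             gamma += '1'
--             epsilon += '0'
--         else:
--             epsilon += '1'
--             gamma += '0'
--
--     # Return the rates as strings
--     return gamma, epsilon
-- ===== SOURCE B (Python) =====
-- def data2Rates(data):
--     # Build a per-column frequency table in one row-major pass, then emit both rates from it.
--     valueSize = max(len(data[0]) - 1, 0)
--     counts = [0] * valueSize
--     for row in data:
--         counts = [c + (ch == '1') for c, ch in zip(counts, row)]
--     n = len(data)
--     gamma = ''.join('1' if c > n - c else '0' for c in counts)
--     epsilon = ''.join('0' if c > n - c else '1' for c in counts)
--     return gamma, epsilon
-- ===== Notes on version B (the rewrite author's own statement) =====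
-- stated objective: alternative
-- what changed: B replaces A's column-major traversal (for each bit position, rescan every row and append to two growing strings) by one row-major pass that folds each row into a per-column frequency table via zip, followed by a separate pass that renders both rate strings from the table.
import Mathlib
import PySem

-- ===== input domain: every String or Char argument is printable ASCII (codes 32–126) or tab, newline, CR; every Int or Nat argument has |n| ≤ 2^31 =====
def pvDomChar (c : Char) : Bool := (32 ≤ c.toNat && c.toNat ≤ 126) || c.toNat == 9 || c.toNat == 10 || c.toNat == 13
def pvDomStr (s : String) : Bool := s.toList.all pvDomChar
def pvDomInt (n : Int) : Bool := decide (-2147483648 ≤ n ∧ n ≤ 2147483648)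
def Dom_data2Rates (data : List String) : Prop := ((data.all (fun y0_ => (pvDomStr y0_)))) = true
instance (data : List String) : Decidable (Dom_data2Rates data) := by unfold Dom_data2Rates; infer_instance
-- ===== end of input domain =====

-- B builds a per-column frequency table in one row-major pass and then renders both rate
-- strings from it, instead of A's column-major rescan of all rows per bit position (alternative).


-- ===== PORT A =====
-- A's inner loop: count the '1' characters in column i over all rows.  j[i] is
-- PySem.Str.pyGet?; where it is none Python raises IndexError — those inputs are outside Pre_.
def pvOnes (data : List String) (i : Int) : Int :=
  data.foldl (fun ones j => if PySem.Str.pyGet? j i = some '1' then ones + 1 else ones) 0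

-- valueSize = len(data[0]) - 1 (data[0] raises on empty data — outside Pre_); the loop over
-- range(valueSize) appends to the growing (gamma, epsilon) pair exactly as A does.
def data2Rates (data : List String) : String × String :=
  (PySem.List.pyRange 0 (PySem.Str.len (data.headD "") - 1) 1).foldl
    (fun (ge : String × String) i =>
      if pvOnes data i > (data.length : Int) - pvOnes data i then (ge.1 ++ "1", ge.2 ++ "0")
      else (ge.1 ++ "0", ge.2 ++ "1"))
    ("", "")

-- ===== PORT B =====
-- B's loop body: counts = [c + (ch == '1') for c, ch in zip(counts, row)]
def pvStepB (cs : List Int) (row : String) : List Int :=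
  (cs.zip row.toList).map (fun p => p.1 + (if p.2 = '1' then 1 else 0))

-- the frequency table after B's single pass over data (counts = [0]*max(len(data[0])-1, 0))
def pvCounts (data : List String) : List Int :=
  data.foldl pvStepB (List.replicate (max (PySem.Str.len (data.headD "") - 1) 0).toNat 0)

def data2Rates_alt (data : List String) : String × String :=
  (PySem.Str.join "" ((pvCounts data).map
     (fun c => if c > (data.length : Int) - c then "1" else "0")),
   PySem.Str.join "" ((pvCounts data).map
     (fun c => if c > (data.length : Int) - c then "0" else "1")))

-- ===== PRECONDITION & SPEC =====
-- Pre_ excludes exactly the inputs where Python A raises: empty data (IndexError on data[0])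
-- and rows shorter than len(data[0]) - 1 (IndexError on j[i]).
def Pre_data2Rates (data : List String) : Prop :=
  data ≠ [] ∧ ∀ s ∈ data, PySem.Str.len (data.headD "") - 1 ≤ PySem.Str.len s
instance (data : List String) : Decidable (Pre_data2Rates data) := by
  unfold Pre_data2Rates; infer_instance

def pvWitness_data2Rates : List String := ["101\n", "110\n", "011\n"]

def Spec_data2Rates (data : List String) (out : String × String) : Prop := out = data2Rates_alt data
instance (data : List String) (out : String × String) : Decidable (Spec_data2Rates data out) := by
  unfold Spec_data2Rates; infer_instance

-- ===== CLAIM (what is proved, stated in full; the proofs are below) =====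
def Claim_equal_data2Rates : Prop := ∀ (data : List String),
  Dom_data2Rates data → Pre_data2Rates data → Spec_data2Rates data (data2Rates data)

-- ===== LEMMAS AND PROOFS =====

-- the character A appends to gamma (pvF1) and to epsilon (pvF2) for column i
def pvF1 (data : List String) (i : Int) : String :=
  if pvOnes data i > (data.length : Int) - pvOnes data i then "1" else "0"
def pvF2 (data : List String) (i : Int) : String :=
  if pvOnes data i > (data.length : Int) - pvOnes data i then "0" else "1"

-- the length of the table is preserved by B's fold when every row is long enough
lemma pv_len_fold (data : List String) : ∀ (cs : List Int),
    (∀ row ∈ data, cs.length ≤ row.toList.length) →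
    (data.foldl pvStepB cs).length = cs.length := by
  induction data with
  | nil => intro cs _; rfl
  | cons row data ih =>
    intro cs h
    have hlen : (pvStepB cs row).length = cs.length := by
      simp [pvStepB]
      exact h row (List.mem_cons_self)
    simp only [List.foldl_cons]
    rw [ih (pvStepB cs row) (by intro r hr; rw [hlen]; exact h r (List.mem_cons_of_mem _ hr)),
        hlen]

-- entry k of the table after B's fold is A's column-k count, started from the entry's old value
lemma pv_get_fold (data : List String) : ∀ (cs : List Int) (k : Nat) (c : Int),
    (∀ row ∈ data, cs.length ≤ row.toList.length) → cs[k]? = some c →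
    (data.foldl pvStepB cs)[k]? =
      some (data.foldl (fun o row => if row.toList[k]? = some '1' then o + 1 else o) c) := by
  induction data with
  | nil => intro cs k c _ hc; simpa using hc
  | cons row data ih =>
    intro cs k c h hc
    have hk : k < cs.length := by
      by_contra hk
      simp [List.getElem?_eq_none (by omega : cs.length ≤ k)] at hc
    have hc' : cs[k] = c := by
      rw [List.getElem?_eq_getElem hk] at hc
      exact Option.some.inj hc
    have hrow : cs.length ≤ row.toList.length := h row (List.mem_cons_self)
    have hkr : k < row.toList.length := lt_of_lt_of_le hk hrow
    have hkz : k < (cs.zip row.toList).length := by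
      rw [List.length_zip]; omega
    have hstep : (pvStepB cs row)[k]? =
        some (if row.toList[k]? = some '1' then c + 1 else c) := by
      simp only [pvStepB, List.getElem?_map, List.getElem?_eq_getElem hkz, List.getElem_zip,
        Option.map_some, List.getElem?_eq_getElem hkr, hc', Option.some.injEq]
      by_cases hch : row.toList[k] = '1' <;> simp [hch]
    simp only [List.foldl_cons]
    rw [ih (pvStepB cs row) k _
        (by intro r hr
            have hl : (pvStepB cs row).length = cs.length := by
              simp [pvStepB]; exact hrow
            rw [hl]; exact h r (List.mem_cons_of_mem _ hr))
        hstep]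

-- B's finished table is the list of A's per-column counts
lemma pv_counts_eq (data : List String) (vn : Nat)
    (h : ∀ row ∈ data, vn ≤ row.toList.length) :
    data.foldl pvStepB (List.replicate vn 0) =
      (PySem.List.pyRange 0 (vn : Int) 1).map (pvOnes data) := by
  rw [PySem.List.pyRange_zero_nat, List.map_map]
  apply List.ext_getElem?
  intro k
  by_cases hk : k < vn
  · rw [pv_get_fold data (List.replicate vn 0) k 0 (by simpa using h) (by simp [hk])]
    rw [List.getElem?_map, List.getElem?_range hk]
    simp only [Option.map_some, Option.some.injEq]
    simp [pvOnes, Function.comp]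
  · have h1 : (data.foldl pvStepB (List.replicate vn 0)).length ≤ k := by
      rw [pv_len_fold data _ (by simpa using h)]; simp; omega
    rw [List.getElem?_eq_none h1, List.getElem?_eq_none (by simp; omega)]

lemma pv_join_cons (x : String) (xs : List String) :
    PySem.Str.join "" (x :: xs) = x ++ PySem.Str.join "" xs := by
  apply String.toList_inj.mp
  rw [String.toList_append, PySem.Str.toList_join, PySem.Str.toList_join, List.map_cons]
  cases xs with
  | nil => rw [List.map_nil, PySem.Chars.join_singleton, PySem.Chars.join_nil, List.append_nil]
  | cons y ys => rw [List.map_cons, PySem.Chars.join_cons_cons]; simp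

-- a fold that appends one-character strings is the join of the mapped list
lemma pv_foldl_str (f : Int → String) : ∀ (l : List Int) (g : String),
    l.foldl (fun g i => g ++ f i) g = g ++ PySem.Str.join "" (l.map f) := by
  intro l
  induction l with
  | nil =>
    intro g
    apply String.toList_inj.mp
    rw [List.foldl_nil, List.map_nil, String.toList_append, PySem.Str.toList_join, List.map_nil,
      PySem.Chars.join_nil, List.append_nil]
  | cons i l ih =>
    intro g
    simp only [List.foldl_cons, List.map_cons, ih, pv_join_cons, String.append_assoc]

-- the two pyRanges used by A and B coincide (a negative valueSize gives the empty range)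
lemma pv_range_eq (v : Int) :
    PySem.List.pyRange 0 v 1 = PySem.List.pyRange 0 (((max v 0).toNat : Nat) : Int) 1 := by
  by_cases hv : 0 ≤ v
  · congr 1; omega
  · rw [PySem.List.pyRange_one_eq_nil (by omega), PySem.List.pyRange_one_eq_nil (by omega)]

-- ===== VERDICT (by name: the statement is the Claim_ definition above) =====
theorem data2Rates_spec : Claim_equal_data2Rates := by
  intro data _ hpre
  obtain ⟨hne, hlen⟩ := hpre
  unfold Spec_data2Rates data2Rates data2Rates_alt pvCounts
  have hrows : ∀ row ∈ data,
      (max (PySem.Str.len (data.headD "") - 1) 0).toNat ≤ row.toList.length := by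
    intro row hr
    have h1 := hlen row hr
    simp only [PySem.Str.len_eq] at h1 ⊢
    omega
  rw [pv_counts_eq data _ hrows, pv_range_eq (PySem.Str.len (data.headD "") - 1)]
  have hstep : (fun (ge : String × String) i =>
      if pvOnes data i > (data.length : Int) - pvOnes data i then (ge.1 ++ "1", ge.2 ++ "0")
      else (ge.1 ++ "0", ge.2 ++ "1")) =
      (fun (ge : String × String) i => (ge.1 ++ pvF1 data i, ge.2 ++ pvF2 data i)) := by
    funext ge i
    by_cases h : pvOnes data i > (data.length : Int) - pvOnes data i <;> simp [pvF1, pvF2, h]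
  have h2 := PySem.List.foldl_prod_mk
      (fun (g : String) (i : Int) => g ++ pvF1 data i)
      (fun (g : String) (i : Int) => g ++ pvF2 data i)
      (PySem.List.pyRange 0 (((max (PySem.Str.len (data.headD "") - 1) 0).toNat : Nat) : Int) 1)
      "" ""
  simp only [] at h2
  rw [hstep, h2, pv_foldl_str (pvF1 data), pv_foldl_str (pvF2 data)]
  simp [List.map_map]
  exact ⟨rfl, rfl⟩
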